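-- pv_equiv track=rewrite | github.com/matteo-pallini/algo | algo/leetcode/sum_of_beauty.py | sum_of_beauty
-- ===== SOURCE A (Python) =====
-- import math
--
-- def sum_of_beauty(nums):
--     mins, maxs, min_v,  max_v = [], [], 0, math.inf
--     for v in nums:
--         if v > min_v:
--             min_v = v
--         mins.append(min_v)
--     for v in nums[::-1]:
--         if v < max_v:
--             max_v = v
--         maxs.append(max_v)
--     maxs = maxs[::-1]
--     final_score = 0
--     for idx, (min_v, v, max_v) in enumerate(zip(mins, nums[1:-1], maxs[2:])):
--         if min_v < v < max_v:
--             final_score += 2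
--         elif nums[idx] < v < nums[idx+2]:
--             final_score += 1
--         else:
--             pass
--     return final_score
-- ===== SOURCE B (Python) =====
-- def sum_of_beauty(nums):
--     total = 0
--     for i in range(1, len(nums) - 1):
--         v = nums[i]
--         left_max = max([0] + nums[:i])
--         right_min = min(nums[i+1:])
--         if left_max < v < right_min:
--             total += 2
--         elif nums[i-1] < v < nums[i+1]:
--             total += 1
--     return total
-- ===== Notes on version B (the rewrite author's own statement) =====
-- stated objective: simpler
-- what changed: B drops A's two precomputed prefix-max/suffix-min tables (built with append loops, a reversal and a three-way zip) and instead, for each middle index, rescans the prefix and suffix directly with max/min, folding A's 0 starting value into the left maximum.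
import Mathlib
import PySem

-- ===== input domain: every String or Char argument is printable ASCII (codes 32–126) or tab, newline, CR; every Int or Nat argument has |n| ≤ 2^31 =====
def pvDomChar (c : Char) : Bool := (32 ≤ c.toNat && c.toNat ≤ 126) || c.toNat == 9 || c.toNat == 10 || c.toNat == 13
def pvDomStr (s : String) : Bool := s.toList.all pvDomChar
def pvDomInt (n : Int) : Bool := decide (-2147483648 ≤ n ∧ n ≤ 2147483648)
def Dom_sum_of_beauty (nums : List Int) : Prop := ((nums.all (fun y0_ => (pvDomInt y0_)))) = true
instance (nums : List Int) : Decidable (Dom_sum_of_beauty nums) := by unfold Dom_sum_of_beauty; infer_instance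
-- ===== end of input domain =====

-- B replaces A's precomputed prefix-max/suffix-min tables (append loops, a reversal,
-- a three-way zip) by a direct rescan of the prefix and suffix at each middle index:
-- simpler code, no speed claim.

-- ===== PORT A =====
-- math.inf is modelled by `none` in an `Option Int` running state: `v < math.inf` is
-- always true, which is exactly `pyLtInf v none = true`; once the state is `some x`
-- the comparison is the integer one. Exact for this program (only comparisons touch it).
def pyLtInf (v : Int) (m : Option Int) : Bool :=
  match m with
  | none => true
  | some x => decide (v < x)

-- chained comparison nums[idx] < v < nums[idx+2] (Python indexing via pyGet?; the
-- `false` arms correspond to IndexError and are unreachable in this program).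
def chk2 (nums : List Int) (idx v : Int) : Bool :=
  match PySem.List.pyGet? nums idx, PySem.List.pyGet? nums (idx + 2) with
  | some a, some b => decide (a < v) && decide (v < b)
  | _, _ => false

def sum_of_beauty (nums : List Int) : Int :=
  -- locals min_v / v / max_v / idx are inlined as projections of the loop state
  ((PySem.List.enumerate
      ((nums.foldl (fun (st : List Int × Int) v =>
          (st.1 ++ [if v > st.2 then v else st.2], if v > st.2 then v else st.2)) ([], 0)).1.zip
        ((PySem.List.slice nums (some 1) (some (-1))).zip
          (PySem.List.slice
            (((PySem.List.slice? nums none none (-1)).getD []).foldl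
              (fun (st : List (Option Int) × Option Int) v =>
                (st.1 ++ [if pyLtInf v st.2 then some v else st.2],
                 if pyLtInf v st.2 then some v else st.2)) ([], none)).1.reverse
            (some 2)))) 0).foldl
    (fun acc (p : Int × (Int × (Int × Option Int))) =>
      if decide (p.2.1 < p.2.2.1) && pyLtInf p.2.2.1 p.2.2.2 then acc + 2
      else if chk2 nums p.1 p.2.2.1 then acc + 1
      else acc) 0)

-- ===== PORT B =====
def sum_of_beauty_alt (nums : List Int) : Int :=
  -- locals v / left_max / right_min are inlined
  (PySem.List.pyRange 1 ((nums.length : Int) - 1) 1).foldl (fun total i =>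
    if (PySem.List.max? ((0 : Int) :: PySem.List.slice nums none (some i)) (fun y => y)).getD 0 < PySem.List.pyGetD nums i 0 ∧
       PySem.List.pyGetD nums i 0 < (PySem.List.min? (PySem.List.slice nums (some (i + 1)) none) (fun y => y)).getD 0 then total + 2
    else if PySem.List.pyGetD nums (i - 1) 0 < PySem.List.pyGetD nums i 0 ∧
            PySem.List.pyGetD nums i 0 < PySem.List.pyGetD nums (i + 1) 0 then total + 1
    else total) 0


-- ===== PRECONDITION & SPEC =====
def Spec_sum_of_beauty (nums : List Int) (out : Int) : Prop := out = sum_of_beauty_alt nums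
instance (nums : List Int) (out : Int) : Decidable (Spec_sum_of_beauty nums out) := by unfold Spec_sum_of_beauty; infer_instance

-- ===== CLAIM (what is proved, stated in full; the proofs are below) =====
def Claim_equal_sum_of_beauty : Prop := ∀ (nums : List Int), Dom_sum_of_beauty nums → Spec_sum_of_beauty nums (sum_of_beauty nums)

-- ===== LEMMAS AND PROOFS =====

def runMax : List Int → Int → List Int
  | [], _ => []
  | v :: t, m => (if v > m then v else m) :: runMax t (if v > m then v else m)

def runMinO : List Int → Option Int → List (Option Int)
  | [], _ => []
  | v :: t, m => (if pyLtInf v m then some v else m) :: runMinO t (if pyLtInf v m then some v else m)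

def runMin : List Int → Int → List Int
  | [], _ => []
  | v :: t, m => (if v < m then v else m) :: runMin t (if v < m then v else m)

def minOf : List Int → Int
  | [] => 0
  | h :: t => t.foldl min h

lemma step_max (m v : Int) : (if v > m then v else m) = max m v := by
  rw [max_def]; split <;> split <;> omega

lemma step_min (m v : Int) : (if v < m then v else m) = min m v := by
  rw [min_def]; split <;> split <;> omega

lemma foldl_mins : ∀ (xs acc : List Int) (m : Int),
    (xs.foldl (fun (st : List Int × Int) v =>
      (st.1 ++ [if v > st.2 then v else st.2], if v > st.2 then v else st.2)) (acc, m)).1 = acc ++ runMax xs m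
  | [], acc, m => by simp [runMax]
  | v :: t, acc, m => by
    simp only [List.foldl_cons, runMax]
    rw [foldl_mins t]
    simp

lemma foldl_maxs : ∀ (xs : List Int) (acc : List (Option Int)) (m : Option Int),
    (xs.foldl (fun (st : List (Option Int) × Option Int) v =>
      (st.1 ++ [if pyLtInf v st.2 then some v else st.2],
       if pyLtInf v st.2 then some v else st.2)) (acc, m)).1 = acc ++ runMinO xs m
  | [], acc, m => by simp [runMinO]
  | v :: t, acc, m => by
    simp only [List.foldl_cons, runMinO]
    rw [foldl_maxs t]
    simp

lemma length_runMax : ∀ (xs : List Int) (m : Int), (runMax xs m).length = xs.length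
  | [], _ => rfl
  | v :: t, m => by simp [runMax, length_runMax t]

lemma length_runMinO : ∀ (xs : List Int) (m : Option Int), (runMinO xs m).length = xs.length
  | [], _ => rfl
  | v :: t, m => by simp [runMinO, length_runMinO t]

lemma runMax_getElem? : ∀ (xs : List Int) (m : Int) (k : Nat), k < xs.length →
    (runMax xs m)[k]? = some ((xs.take (k+1)).foldl max m)
  | v :: t, m, 0, _ => by simp [runMax, step_max]
  | v :: t, m, k+1, h => by
    simp only [runMax, List.getElem?_cons_succ, List.take_succ_cons, List.foldl_cons]
    rw [runMax_getElem? t _ k (by simpa using h), step_max]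

lemma runMin_getElem? : ∀ (xs : List Int) (m : Int) (k : Nat), k < xs.length →
    (runMin xs m)[k]? = some ((xs.take (k+1)).foldl min m)
  | v :: t, m, 0, _ => by simp [runMin, step_min]
  | v :: t, m, k+1, h => by
    simp only [runMin, List.getElem?_cons_succ, List.take_succ_cons, List.foldl_cons]
    rw [runMin_getElem? t _ k (by simpa using h), step_min]

lemma runMinO_some : ∀ (xs : List Int) (m : Int),
    runMinO xs (some m) = (runMin xs m).map some
  | [], _ => rfl
  | v :: t, m => by
    simp only [runMinO, runMin, pyLtInf, List.map_cons]
    by_cases h : v < m <;> simp [h, runMinO_some t]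

lemma runMinO_getElem? (nums : List Int) (i : Nat) (hne : nums ≠ []) (hi : i < nums.length) :
    (runMinO nums none)[i]? = some (some (minOf (nums.take (i+1)))) := by
  obtain ⟨h, t, rfl⟩ := List.exists_cons_of_ne_nil hne
  have : runMinO (h :: t) none = some h :: (runMin t h).map some := by
    simp [runMinO, pyLtInf, runMinO_some]
  rw [this]
  cases i with
  | zero => simp [minOf]
  | succ i =>
    simp only [List.getElem?_cons_succ, List.getElem?_map, List.take_succ_cons, minOf]
    rw [runMin_getElem? t h i (by simpa using hi)]
    rfl

lemma minOf_le {l : List Int} : ∀ y ∈ l, minOf l ≤ y := by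
  cases l with
  | nil => simp
  | cons h t =>
    intro y hy
    rcases List.mem_cons.mp hy with rfl | hy
    · exact (PySem.List.foldl_min_le t y).1
    · exact (PySem.List.foldl_min_le t h).2 y hy

lemma minOf_mem {l : List Int} (h : l ≠ []) : minOf l ∈ l := by
  cases l with
  | nil => exact absurd rfl h
  | cons a t =>
    rcases PySem.List.foldl_min_mem t a with h1 | h1
    · simp [minOf, h1]
    · simp [minOf, List.mem_cons, h1]

lemma minOf_perm {l₁ l₂ : List Int} (p : l₁.Perm l₂) : minOf l₁ = minOf l₂ := by
  rcases eq_or_ne l₁ [] with rfl | h1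
  · rw [p.nil_eq.symm]
  · have h2 : l₂ ≠ [] := by
      intro h; subst h; exact h1 p.eq_nil
    exact le_antisymm (minOf_le _ (p.mem_iff.mpr (minOf_mem h2)))
      (minOf_le _ (p.symm.mem_iff.mpr (minOf_mem h1)))

def mkTriples (nums : List Int) : List (Int × (Int × Option Int)) :=
  (runMax nums 0).zip ((PySem.List.slice nums (some 1) (some (-1))).zip
    (PySem.List.slice ((runMinO nums.reverse none).reverse) (some 2)))

def gA (nums : List Int) (p : Int × (Int × (Int × Option Int))) : Int :=
  if decide (p.2.1 < p.2.2.1) && pyLtInf p.2.2.1 p.2.2.2 then 2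
  else if chk2 nums p.1 p.2.2.1 then 1
  else 0

def gB (nums : List Int) (i : Int) : Int :=
  if (PySem.List.max? ((0 : Int) :: PySem.List.slice nums none (some i)) (fun y => y)).getD 0 < PySem.List.pyGetD nums i 0 ∧
     PySem.List.pyGetD nums i 0 < (PySem.List.min? (PySem.List.slice nums (some (i + 1)) none) (fun y => y)).getD 0 then 2
  else if PySem.List.pyGetD nums (i - 1) 0 < PySem.List.pyGetD nums i 0 ∧
          PySem.List.pyGetD nums i 0 < PySem.List.pyGetD nums (i + 1) 0 then 1
  else 0

lemma foldl_eq_sum_map {α : Type} (l : List α) (F : Int → α → Int) (g : α → Int)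
    (h : ∀ acc p, F acc p = acc + g p) : ∀ a : Int, l.foldl F a = a + (l.map g).sum := by
  induction l with
  | nil => simp
  | cons x t ih => intro a; simp [h, ih, add_assoc]

lemma A_eq (nums : List Int) :
    sum_of_beauty nums = ((PySem.List.enumerate (mkTriples nums) 0).map (gA nums)).sum := by
  unfold sum_of_beauty
  simp only [PySem.List.slice?_none_none_neg_one, Option.getD_some]
  rw [foldl_mins, foldl_maxs]
  simp only [List.nil_append]
  have h : ∀ (acc : Int) (p : Int × (Int × (Int × Option Int))),
      (if decide (p.2.1 < p.2.2.1) && pyLtInf p.2.2.1 p.2.2.2 then acc + 2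
       else if chk2 nums p.1 p.2.2.1 then acc + 1
       else acc) = acc + gA nums p := by
    intro acc p
    unfold gA
    split_ifs <;> omega
  rw [foldl_eq_sum_map _ _ (gA nums) h]
  rw [zero_add]
  rfl

lemma B_eq (nums : List Int) :
    sum_of_beauty_alt nums =
      ((PySem.List.pyRange 1 ((nums.length : Int) - 1) 1).map (gB nums)).sum := by
  unfold sum_of_beauty_alt
  have h : ∀ (acc i : Int),
      (if (PySem.List.max? ((0 : Int) :: PySem.List.slice nums none (some i)) (fun y => y)).getD 0 < PySem.List.pyGetD nums i 0 ∧
          PySem.List.pyGetD nums i 0 < (PySem.List.min? (PySem.List.slice nums (some (i + 1)) none) (fun y => y)).getD 0 then acc + 2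
       else if PySem.List.pyGetD nums (i - 1) 0 < PySem.List.pyGetD nums i 0 ∧
               PySem.List.pyGetD nums i 0 < PySem.List.pyGetD nums (i + 1) 0 then acc + 1
       else acc) = acc + gB nums i := by
    intro acc i
    unfold gB
    split_ifs <;> omega
  rw [foldl_eq_sum_map _ _ (gB nums) h]
  rw [zero_add]

def maxsL (nums : List Int) : List (Option Int) := (runMinO nums.reverse none).reverse

lemma maxsL_getElem? (nums : List Int) (j : Nat) (hj : j < nums.length) :
    (maxsL nums)[j]? = some (some (minOf (nums.drop j))) := by
  unfold maxsL
  have hlen : (runMinO nums.reverse none).length = nums.length := by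
    simp [length_runMinO]
  rw [List.getElem?_reverse (by omega)]
  rw [hlen]
  rw [runMinO_getElem? nums.reverse (nums.length - 1 - j)
      (by simp; intro h; subst h; simp at hj)
      (by simp; omega)]
  have h1 : nums.length - 1 - j + 1 = nums.length - j := by omega
  rw [h1, List.take_reverse]
  have h2 : nums.length - (nums.length - j) = j := by omega
  rw [h2]
  rw [minOf_perm (List.reverse_perm _)]

lemma slice15 (nums : List Int) (h : 1 ≤ nums.length) :
    PySem.List.slice nums (some 1) (some (-1)) = (nums.drop 1).take (nums.length - 2) := by
  show (List.drop (PySem.List.clampIdx nums.length 1) nums).take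
      (PySem.List.clampIdx nums.length (-1) - PySem.List.clampIdx nums.length 1) = _
  have c1 : PySem.List.clampIdx nums.length 1 = 1 := by
    simp only [PySem.List.clampIdx]; split_ifs <;> omega
  have c2 : PySem.List.clampIdx nums.length (-1) = nums.length - 1 := by
    simp only [PySem.List.clampIdx]; split_ifs <;> omega
  rw [c1, c2]
  have h3 : nums.length - 1 - 1 = nums.length - 2 := by omega
  rw [h3]

lemma len_mk (nums : List Int) : (mkTriples nums).length = nums.length - 2 := by
  unfold mkTriples
  have hs : PySem.List.slice (runMinO nums.reverse none).reverse (some 2)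
      = List.drop 2 (runMinO nums.reverse none).reverse := by
    simp [PySem.List.slice_from]
  rw [hs]
  rcases Nat.lt_or_ge nums.length 1 with h | h
  · interval_cases h' : nums.length ; simp_all [runMax, runMinO, List.length_eq_zero_iff]
  · rw [slice15 nums h]
    simp [length_runMax, length_runMinO]
    omega

lemma runMax_getElem (xs : List Int) (m : Int) (k : Nat) (h : k < (runMax xs m).length) :
    (runMax xs m)[k] = (xs.take (k+1)).foldl max m := by
  have h2 := runMax_getElem? xs m k (by rw [← length_runMax xs m]; exact h)
  rw [List.getElem?_eq_getElem h] at h2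
  exact Option.some.inj h2

lemma maxsL_getElem (nums : List Int) (j : Nat) (h : j < ((runMinO nums.reverse none).reverse).length) :
    ((runMinO nums.reverse none).reverse)[j] = some (minOf (nums.drop j)) := by
  have hj : j < nums.length := by simpa [length_runMinO] using h
  have h2 := maxsL_getElem? nums j hj
  unfold maxsL at h2
  rw [List.getElem?_eq_getElem h] at h2
  exact Option.some.inj h2

lemma maps_eq (nums : List Int) :
    (PySem.List.enumerate (mkTriples nums) 0).map (gA nums)
      = (PySem.List.pyRange 1 ((nums.length : Int) - 1) 1).map (gB nums) := by
  apply List.ext_getElem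
  · rw [List.length_map, List.length_map, PySem.List.length_enumerate, len_mk,
      PySem.List.length_pyRange_one]
    omega
  · intro k h1 h2
    have hk : k < nums.length - 2 := by
      simpa [PySem.List.length_enumerate, len_mk] using h1
    have hn : 3 ≤ nums.length := by omega
    simp only [List.getElem_map]
    rw [PySem.List.getElem_enumerate, PySem.List.getElem_pyRange_one]
    simp only [mkTriples, List.getElem_zip]
    simp only [slice15 nums (by omega)]
    have hs2 : PySem.List.slice (runMinO nums.reverse none).reverse (some 2)
        = List.drop 2 (runMinO nums.reverse none).reverse := by
      simp [PySem.List.slice_from]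
    simp only [hs2]
    simp only [runMax_getElem, List.getElem_take, List.getElem_drop, maxsL_getElem]
    have hc1 : 1 + k = k + 1 := Nat.add_comm 1 k
    have hc2 : 2 + k = k + 2 := Nat.add_comm 2 k
    simp only [hc1, hc2]
    unfold gA gB chk2
    have e2 : ((k:Int)) + 2 = ((k+2:Nat):Int) := by push_cast; ring
    have e3 : (1:Int) + (k:Int) = ((k+1:Nat):Int) := by push_cast; ring
    simp only [zero_add, e2, e3, PySem.List.pyGet?_natCast, PySem.List.pyGetD_natCast,
      PySem.List.slice_to_natCast]
    have e4' : ((k+1:Nat):Int) - 1 = ((k:Nat):Int) := by push_cast; ring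
    have e5' : ((k+1:Nat):Int) + 1 = ((k+2:Nat):Int) := by push_cast; ring
    simp only [e4', e5', PySem.List.pyGetD_natCast, PySem.List.slice_from_natCast]
    rw [List.getD_eq_getElem nums 0 (show k < nums.length by omega),
      List.getD_eq_getElem nums 0 (show k + 1 < nums.length by omega),
      List.getD_eq_getElem nums 0 (show k + 2 < nums.length by omega)]
    rw [List.getElem?_eq_getElem (show k < nums.length by omega),
      List.getElem?_eq_getElem (show k + 2 < nums.length by omega)]
    rw [PySem.List.max?_id_cons]
    obtain ⟨h0, t0, hd⟩ := List.exists_cons_of_ne_nil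
      (show nums.drop (k+2) ≠ [] by rw [ne_eq, List.drop_eq_nil_iff]; omega)
    rw [hd, PySem.List.min?_id_cons]
    simp only [minOf, Option.getD_some, pyLtInf, Bool.and_eq_true, decide_eq_true_eq]
    rfl

lemma ab_eq (nums : List Int) : sum_of_beauty nums = sum_of_beauty_alt nums := by
  rw [A_eq, B_eq, maps_eq]

-- ===== VERDICT (by name: the statement is the Claim_ definition above) =====
theorem sum_of_beauty_spec : Claim_equal_sum_of_beauty := by
  intro nums _
  unfold Spec_sum_of_beauty
  exact ab_eq nums
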